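-- pv_equiv track=rewrite | github.com/PARK4139/task_orchestrator_cli | sources/functions/get_losslesscut_windows_improved.py | is_losslesscut_window
-- ===== SOURCE A (Python) =====
-- def is_losslesscut_window(title):
--     """
--     주어진 창 제목이 LosslessCut 창인지 판단
--
--     Args:
--         title: 창 제목
--
--     Returns:
--         bool: LosslessCut 창이면 True, 아니면 False
--     """
--     if not title:
--         return False
--
--     title_lower = title.lower()
--
--     # n. 정확한 기본 창 제목
--     if title_lower == "losslesscut":
--         return True
--
--     # n. LosslessCut으로 시작하고 끝나는 패턴
--     if (title_lower.startswith("losslesscut") and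
--             title_lower.endswith("losslesscut") and
--             " - " in title):
--         return True
--
--     # n. "LosslessCut - [내용] - LosslessCut" 형태
--     if (title_lower.startswith("losslesscut - ") and
--             title_lower.endswith(" - losslesscut")):
--         return True
--
--     # n. "Loading file - [filename] - LosslessCut" 형태
--     if (title_lower.startswith("loading file - ") and
--             title_lower.endswith(" - losslesscut")):
--         return True
--
--     # n. "Exporting - [filename] - LosslessCut" 형태
--     if (title_lower.startswith("exporting - ") and
--             title_lower.endswith(" - losslesscut")):
--         return True
--
--     # 6. 기타 LosslessCut 관련 패턴들
--     losslesscut_keywords = [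
--         "losslesscut",
--         "로딩 중",
--         "loading",
--         "exporting",
--         "출력 중",
--         "불러오는 중"
--     ]
--
--     # LosslessCut 키워드가 포함되고 창 제목에 "LosslessCut"이 포함된 경우
--     if any(keyword in title_lower for keyword in losslesscut_keywords) and "losslesscut" in title_lower:
--         return True
--
--     return False
-- ===== SOURCE B (Python) =====
-- def is_losslesscut_window(title):
--     """LosslessCut window check: every accepting branch of the original
--     cascade implies (and the keyword fallback is implied by) the substring
--     'losslesscut' appearing case-insensitively, so one membership test suffices."""
--     if not title:
--         return False
--     return "losslesscut" in title.lower()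
-- ===== Notes on version B (the rewrite author's own statement) =====
-- stated objective: simpler
-- what changed: Replaced the five-branch prefix/suffix/keyword cascade by a single case-insensitive substring membership test, which every accepting branch implies and the keyword fallback is implied by.
import Mathlib
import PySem

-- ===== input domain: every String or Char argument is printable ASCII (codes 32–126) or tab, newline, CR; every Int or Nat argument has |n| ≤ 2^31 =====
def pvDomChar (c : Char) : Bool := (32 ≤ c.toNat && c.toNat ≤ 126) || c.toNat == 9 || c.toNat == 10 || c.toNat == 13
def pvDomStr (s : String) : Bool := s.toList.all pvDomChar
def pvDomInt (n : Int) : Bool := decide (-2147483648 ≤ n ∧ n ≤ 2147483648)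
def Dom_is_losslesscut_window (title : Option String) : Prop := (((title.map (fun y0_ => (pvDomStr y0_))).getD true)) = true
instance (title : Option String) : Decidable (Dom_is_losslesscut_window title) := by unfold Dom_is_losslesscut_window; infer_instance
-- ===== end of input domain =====

-- B replaces A's five-branch prefix/suffix/keyword cascade with one case-insensitive substring test (simpler; same behaviour).

-- ===== PORT A =====
def is_losslesscut_window (title : Option String) : Bool :=
  match title with
  | none => false
  | some t =>
    if t = "" then false
    else
      let tl := PySem.Str.lower t
      if tl = "losslesscut" then true
      else if PySem.Str.startswith tl "losslesscut" && PySem.Str.endswith tl "losslesscut"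
              && PySem.Str.isIn " - " t then true
      else if PySem.Str.startswith tl "losslesscut - " && PySem.Str.endswith tl " - losslesscut" then true
      else if PySem.Str.startswith tl "loading file - " && PySem.Str.endswith tl " - losslesscut" then true
      else if PySem.Str.startswith tl "exporting - " && PySem.Str.endswith tl " - losslesscut" then true
      else
        let kws : List String := ["losslesscut", "로딩 중", "loading", "exporting", "출력 중", "불러오는 중"]
        if kws.any (fun k => PySem.Str.isIn k tl) && PySem.Str.isIn "losslesscut" tl then true
        else false

-- ===== PORT B =====
def is_losslesscut_window_alt (title : Option String) : Bool :=
  match title with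
  | none => false
  | some t =>
    if t = "" then false
    else PySem.Str.isIn "losslesscut" (PySem.Str.lower t)

-- ===== PRECONDITION & SPEC =====
def Spec_is_losslesscut_window (title : Option String) (out : Bool) : Prop := out = is_losslesscut_window_alt title
instance (title : Option String) (out : Bool) : Decidable (Spec_is_losslesscut_window title out) := by unfold Spec_is_losslesscut_window; infer_instance

-- ===== CLAIM (what is proved, stated in full; the proofs are below) =====
def Claim_equal_is_losslesscut_window : Prop := ∀ (title : Option String), Dom_is_losslesscut_window title → Spec_is_losslesscut_window title (is_losslesscut_window title)

-- ===== LEMMAS AND PROOFS =====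

-- a prefix of tl that contains "losslesscut" forces the substring test true
theorem isIn_of_startswith (tl p : String) (h : PySem.Str.startswith tl p = true)
    (hp : PySem.Str.isIn "losslesscut" p = true) :
    PySem.Str.isIn "losslesscut" tl = true := by
  rw [PySem.Str.isIn_iff_infix] at hp ⊢
  have hpre : p.toList <+: tl.toList := by
    have := PySem.Str.startswith_eq tl p
    rw [this, PySem.Chars.startswith_iff] at h
    exact h
  exact hp.trans hpre.isInfix

-- a suffix of tl that contains "losslesscut" forces the substring test true
theorem isIn_of_endswith (tl p : String) (h : PySem.Str.endswith tl p = true)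
    (hp : PySem.Str.isIn "losslesscut" p = true) :
    PySem.Str.isIn "losslesscut" tl = true := by
  rw [PySem.Str.isIn_iff_infix] at hp ⊢
  have hsuf : p.toList <:+ tl.toList := by
    have := PySem.Str.endswith_eq tl p
    rw [this, PySem.Chars.endswith_iff] at h
    exact h
  exact hp.trans hsuf.isInfix

-- ===== VERDICT (by name: the statement is the Claim_ definition above) =====
theorem is_losslesscut_window_spec : Claim_equal_is_losslesscut_window := by
  intro title _
  unfold Spec_is_losslesscut_window is_losslesscut_window is_losslesscut_window_alt
  match title with
  | none => rfl
  | some t =>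
    by_cases ht : t = ""
    · simp [ht]
    · simp only [ht, if_false]
      set tl := PySem.Str.lower t with htl
      by_cases hin : PySem.Str.isIn "losslesscut" tl = true
      · -- B is true; every path of A that could be reached ends true
        simp only [hin]
        split_ifs with h1 h2 h3 h4 h5 h6
        · rfl
        · rfl
        · rfl
        · rfl
        · rfl
        · rfl
        · -- last branch: its condition holds (isIn was rewritten to true), contradiction
          exfalso
          apply h6
          simp only [List.any_cons, Bool.and_true, Bool.or_eq_true]
          exact Or.inl hin
      · -- B is false: no branch of A can fire
        simp only [Bool.not_eq_true] at hin
        simp only [hin]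
        have contra : ¬ PySem.Str.isIn "losslesscut" tl = true :=
          fun hx => Bool.noConfusion (hin.symm.trans hx)
        split_ifs with h1 h2 h3 h4 h5 h6
        · exact absurd (by rw [h1]; decide) contra
        · obtain ⟨hs, -⟩ := Bool.and_eq_true .. |>.mp (Bool.and_eq_true .. |>.mp h2).1
          exact absurd (isIn_of_startswith tl "losslesscut" hs (by decide)) contra
        · obtain ⟨hs, -⟩ := Bool.and_eq_true .. |>.mp h3
          exact absurd (isIn_of_startswith tl "losslesscut - " hs (by decide)) contra
        · obtain ⟨-, he⟩ := Bool.and_eq_true .. |>.mp h4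
          exact absurd (isIn_of_endswith tl " - losslesscut" he (by decide)) contra
        · obtain ⟨-, he⟩ := Bool.and_eq_true .. |>.mp h5
          exact absurd (isIn_of_endswith tl " - losslesscut" he (by decide)) contra
        · obtain ⟨-, hi⟩ := Bool.and_eq_true .. |>.mp h6
          exact Bool.noConfusion hi
        · rfl
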